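-- pv_equiv track=rewrite | github.com/BPI-SINOVOIP/BPI-S905X3-Android9 | tools/repohooks/rh/shell.py | shell_unquote
-- ===== SOURCE A (Python) =====
-- _SHELL_ESCAPE_CHARS = r'\"`$'
--
-- def shell_unquote(s):
--     """Do the opposite of ShellQuote.
--
--     This function assumes that the input is a valid escaped string.
--     The behaviour is undefined on malformed strings.
--
--     Args:
--       s: An escaped string.
--
--     Returns:
--       The unescaped version of the string.
--     """
--     if not s:
--         return ''
--
--     if s[0] == "'":
--         return s[1:-1]
--
--     if s[0] != '"':
--         return s
--
--     s = s[1:-1]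
--     output = ''
--     i = 0
--     while i < len(s) - 1:
--         # Skip the backslash when it makes sense.
--         if s[i] == '\\' and s[i + 1] in _SHELL_ESCAPE_CHARS:
--             i += 1
--         output += s[i]
--         i += 1
--     return output + s[i] if i < len(s) else output
-- ===== SOURCE B (Python) =====
-- def shell_unquote(s):
--     """Unescape a shell-quoted string (segment-based re-implementation).
--
--     Instead of scanning character by character, split the double-quoted
--     body on backslashes and rejoin the segments: a segment after a
--     backslash keeps or drops that backslash depending on its first
--     character (empty segment = escaped/trailing backslash).
--     """
--     if not s:
--         return ''
--     if s[0] == "'":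
--         return s[1:-1]
--     if s[0] != '"':
--         return s
--     pieces = s[1:-1].split('\\')
--     return pieces[0] + _rejoin(pieces[1:])
--
--
-- def _rejoin(ps):
--     # Each element of ps was preceded by a backslash in the original text.
--     if not ps:
--         return ''
--     q = ps[0]
--     if q == '':
--         if len(ps) == 1:
--             return '\\'                      # trailing lone backslash stays
--         return '\\' + ps[1] + _rejoin(ps[2:])  # escaped backslash
--     if q[0] in '"$`':
--         return q + _rejoin(ps[1:])           # backslash dropped
--     return '\\' + q + _rejoin(ps[1:])        # backslash kept
-- ===== Notes on version B (the rewrite author's own statement) =====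
-- stated objective: alternative
-- what changed: Replaces A's character-by-character lookahead while-loop with a segment-level algorithm: split the double-quoted body on backslashes once and recursively rejoin the segments, deciding per segment (empty = escaped/trailing backslash, first char in '"$`' = drop the backslash, else keep it).
import Mathlib
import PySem

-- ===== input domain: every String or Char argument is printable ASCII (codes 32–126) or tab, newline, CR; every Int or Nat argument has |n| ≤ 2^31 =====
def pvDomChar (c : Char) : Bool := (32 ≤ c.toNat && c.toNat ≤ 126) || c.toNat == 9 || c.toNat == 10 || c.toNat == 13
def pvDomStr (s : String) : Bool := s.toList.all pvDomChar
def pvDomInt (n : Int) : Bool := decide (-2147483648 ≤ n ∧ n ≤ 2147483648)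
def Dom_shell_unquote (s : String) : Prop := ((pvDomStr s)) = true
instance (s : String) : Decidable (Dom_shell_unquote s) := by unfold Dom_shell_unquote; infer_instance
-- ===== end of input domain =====

-- B replaces A's character-by-character lookahead while-loop by a segment-level
-- algorithm: split the double-quoted body on backslashes once, then recursively
-- rejoin the segments by a rule on each segment's first character; objective: alternative.

-- the module constant _SHELL_ESCAPE_CHARS = r'\"`$' (used by port A)
def escChars : List Char := ['\\', '"', '`', '$']

-- ===== PORT A =====
-- A's while-loop: index i, string accumulator `output`, lookahead at s[i+1]
def loopA (t : List Char) (i : Nat) (out : List Char) : List Char :=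
  if h : i + 1 < t.length then          -- Python: while i < len(s) - 1
    if t[i] = '\\' ∧ t[i+1] ∈ escChars then
      loopA t (i+2) (out ++ [t[i+1]])   -- i += 1; output += s[i]; i += 1
    else
      loopA t (i+1) (out ++ [t[i]])     -- output += s[i]; i += 1
  else if h2 : i < t.length then out ++ [t[i]]   -- return output + s[i] if i < len(s)
  else out
termination_by t.length - i

def shell_unquote (s : String) : String :=
  if s.toList.isEmpty then "" else
  if PySem.List.pyGet? s.toList 0 = some '\'' then
    String.ofList (PySem.List.slice s.toList (some 1) (some (-1)))       -- s[1:-1]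
  else if PySem.List.pyGet? s.toList 0 ≠ some '"' then s
  else
    String.ofList (loopA (PySem.List.slice s.toList (some 1) (some (-1))) 0 [])

-- ===== PORT B =====
-- B's helper _rejoin: each segment was preceded by a backslash in the original
def rejoinB : List (List Char) → List Char
  | [] => []                                   -- if not ps: return ''
  | [] :: rest =>
    match rest with
    | [] => ['\\']                             -- trailing lone backslash stays
    | p :: rest' => '\\' :: (p ++ rejoinB rest')   -- escaped backslash
  | (c :: cs) :: rest =>
    if c ∈ ['"', '$', '`'] then (c :: cs) ++ rejoinB rest    -- backslash dropped
    else '\\' :: ((c :: cs) ++ rejoinB rest)                 -- backslash kept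

def shell_unquote_alt (s : String) : String :=
  if s.toList.isEmpty then "" else
  if PySem.List.pyGet? s.toList 0 = some '\'' then
    String.ofList (PySem.List.slice s.toList (some 1) (some (-1)))
  else if PySem.List.pyGet? s.toList 0 ≠ some '"' then s
  else
    -- pieces = s[1:-1].split('\\'); return pieces[0] + _rejoin(pieces[1:])
    match PySem.Chars.splitOn (PySem.List.slice s.toList (some 1) (some (-1))) ['\\'] with
    | [] => ""                                  -- unreachable: split is never empty
    | p :: rest => String.ofList (p ++ rejoinB rest)

-- ===== PRECONDITION & SPEC =====
def Spec_shell_unquote (s : String) (out : String) : Prop := out = shell_unquote_alt s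
instance (s : String) (out : String) : Decidable (Spec_shell_unquote s out) := by unfold Spec_shell_unquote; infer_instance

-- ===== CLAIM (what is proved, stated in full; the proofs are below) =====
def Claim_equal_shell_unquote : Prop := ∀ (s : String), Dom_shell_unquote s → Spec_shell_unquote s (shell_unquote s)

-- ===== LEMMAS AND PROOFS =====

-- proof-side reference function: left-to-right non-overlapping unescaping
def unescB : List Char → List Char
  | [] => []
  | c :: rest =>
    if c = '\\' then
      match rest with
      | [] => ['\\']
      | c2 :: rest2 =>
        if c2 ∈ escChars then c2 :: unescB rest2 else '\\' :: unescB (c2 :: rest2)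
    else c :: unescB rest

-- proof-side reference split (single-character separator, accumulator pre)
def mySplit (c : Char) (pre : List Char) : List Char → List (List Char)
  | [] => [pre]
  | x :: xs => if x = c then pre :: mySplit c [] xs else mySplit c (pre ++ [x]) xs

theorem unescB_single (c : Char) : unescB [c] = [c] := by
  by_cases h : c = '\\'
  · subst h; rfl
  · simp [unescB, h]

theorem unescB_cons_ne {c : Char} (h : c ≠ '\\') (rest : List Char) :
    unescB (c :: rest) = c :: unescB rest := by
  cases rest with
  | nil => simp [unescB, h]
  | cons c2 r => simp [unescB, h]

theorem unescB_esc {c2 : Char} (h : c2 ∈ escChars) (rest : List Char) :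
    unescB ('\\' :: c2 :: rest) = c2 :: unescB rest := by
  simp [unescB, h]

theorem unescB_noesc {c2 : Char} (h : c2 ∉ escChars) (rest : List Char) :
    unescB ('\\' :: c2 :: rest) = '\\' :: unescB (c2 :: rest) := by
  simp [unescB, h]

-- push a backslash-free prefix through unescB
theorem unescB_append {r : List Char} (h : '\\' ∉ r) (X : List Char) :
    unescB (r ++ X) = r ++ unescB X := by
  induction r with
  | nil => rfl
  | cons c cs ih =>
    have hc : c ≠ '\\' := fun he => h (he ▸ List.mem_cons_self ..)
    have hcs : '\\' ∉ cs := fun hm => h (List.mem_cons_of_mem _ hm)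
    rw [List.cons_append, unescB_cons_ne hc, ih hcs]
    simp

-- A's loop computes unescB on the remaining suffix
theorem loopA_eq (t : List Char) (i : Nat) (out : List Char) :
    loopA t i out = out ++ unescB (t.drop i) := by
  by_cases h : i + 1 < t.length
  · have h0 : i < t.length := by omega
    have h1 : i + 1 < t.length := h
    have hd : t.drop i = t[i] :: t.drop (i+1) := List.drop_eq_getElem_cons h0
    have hd1 : t.drop (i+1) = t[i+1] :: t.drop (i+2) := List.drop_eq_getElem_cons h1
    by_cases hc : t[i] = '\\' ∧ t[i+1] ∈ escChars
    · rw [loopA]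
      simp only [h, dif_pos, hc]
      rw [loopA_eq t (i+2) (out ++ [t[i+1]])]
      rw [hd, hd1, hc.1, unescB_esc hc.2]
      simp
    · rw [loopA]
      simp only [h, dif_pos, hc, if_neg, not_false_iff]
      rw [loopA_eq t (i+1) (out ++ [t[i]])]
      rw [hd, hd1]
      by_cases hb : t[i] = '\\'
      · have h2 : t[i+1] ∉ escChars := by
          intro hm; exact hc ⟨hb, hm⟩
        rw [hb, unescB_noesc h2, ← hd1]
        simp
      · rw [unescB_cons_ne hb, ← hd1]
        simp
  · rw [loopA]
    simp only [h, dif_neg, not_false_iff]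
    by_cases h2 : i < t.length
    · have : t.drop i = [t[i]] := by
        rw [List.drop_eq_getElem_cons h2]
        have : t.drop (i+1) = [] := List.drop_eq_nil_of_le (by omega)
        rw [this]
      simp [h2, this, unescB_single]
    · have : t.drop i = [] := List.drop_eq_nil_of_le (by omega)
      simp [h2, this, unescB]
termination_by t.length - i
decreasing_by all_goals omega

theorem mySplit_cons_self (c : Char) (pre xs : List Char) :
    mySplit c pre (c :: xs) = pre :: mySplit c [] xs := by simp [mySplit]

theorem mySplit_cons_ne {x c : Char} (h : x ≠ c) (pre xs : List Char) :
    mySplit c pre (x :: xs) = mySplit c (pre ++ [x]) xs := by simp [mySplit, h]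

-- mySplit never returns the empty list
theorem mySplit_ne_nil (c : Char) (pre l : List Char) : mySplit c pre l ≠ [] := by
  induction l generalizing pre with
  | nil => simp [mySplit]
  | cons x xs ih =>
    by_cases hx : x = c <;> simp [mySplit, hx, ih]

-- PySem's splitOn on a single-character separator is mySplit
theorem splitOn_go_single (c : Char) (fuel : Nat) :
    ∀ (l cur : List Char) (acc : List (List Char)), l.length ≤ fuel →
    PySem.Chars.splitOn.go [c] fuel l cur acc = acc.reverse ++ mySplit c cur.reverse l := by
  induction fuel with
  | zero =>
    intro l cur acc hl
    have : l = [] := List.eq_nil_of_length_eq_zero (by omega)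
    subst this
    simp [PySem.Chars.splitOn.go, mySplit]
  | succ f ih =>
    intro l cur acc hl
    cases l with
    | nil => simp [PySem.Chars.splitOn.go, mySplit]
    | cons x xs =>
      rw [PySem.Chars.splitOn.go]
      by_cases hx : x = c
      · subst hx
        have hp : List.isPrefixOf [x] (x :: xs) = true := by
          simp [List.isPrefixOf]
        rw [if_pos hp]
        have := ih xs [] (cur.reverse :: acc) (by simpa using Nat.le_of_succ_le_succ hl)
        simp only [List.length_cons, List.length_nil, List.drop_succ_cons, List.drop_zero]
          at this ⊢
        rw [this]
        simp [mySplit]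
      · have hp : List.isPrefixOf [c] (x :: xs) = false := by
          simp [List.isPrefixOf]
          intro he; exact absurd he.symm hx
        rw [if_neg (by simp [hp])]
        rw [ih xs (x :: cur) acc (by simpa using Nat.le_of_succ_le_succ hl)]
        simp [mySplit, hx]

theorem splitOn_single (c : Char) (l : List Char) :
    PySem.Chars.splitOn l [c] = mySplit c [] l := by
  rw [PySem.Chars.splitOn, splitOn_go_single c (l.length + 1) l [] [] (by omega)]
  simp

theorem bs_mem_escChars : '\\' ∈ escChars := by decide

theorem esc3_iff {c : Char} (hc : c ≠ '\\') : c ∈ ['"', '$', '`'] ↔ c ∈ escChars := by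
  simp [escChars]
  tauto

-- the heart: rejoining the backslash-split segments is unescB
theorem rejoin_mySplit (xs : List Char) :
    (∀ q, (match mySplit '\\' q xs with
            | [] => []
            | p :: rest => p ++ rejoinB rest) = q ++ unescB xs)
    ∧ (∀ q, '\\' ∉ q → rejoinB (mySplit '\\' q xs) = unescB ('\\' :: (q ++ xs))) := by
  induction xs with
  | nil =>
    constructor
    · intro q; simp [mySplit, rejoinB, unescB]
    · intro q hq
      cases q with
      | nil => simp [mySplit, rejoinB, unescB]
      | cons qc qs =>
        have hqc : qc ≠ '\\' := fun he => hq (he ▸ List.mem_cons_self ..)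
        have hqs : '\\' ∉ qs := fun hm => hq (List.mem_cons_of_mem _ hm)
        simp only [mySplit, rejoinB, List.append_nil]
        by_cases he : qc ∈ ['"', '$', '`']
        · rw [if_pos he, unescB_esc ((esc3_iff hqc).1 he)]
          have : unescB qs = qs := by
            have := unescB_append hqs ([] : List Char)
            simpa [unescB] using this
          simp [this]
        · rw [if_neg he]
          rw [unescB_noesc (fun hm => he ((esc3_iff hqc).2 hm))]
          rw [unescB_cons_ne hqc]
          have : unescB qs = qs := by
            have := unescB_append hqs ([] : List Char)
            simpa [unescB] using this
          simp [this]
  | cons x xs ih =>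
    constructor
    · intro q
      by_cases hx : x = '\\'
      · subst hx
        rw [mySplit_cons_self]
        rw [show unescB ('\\' :: xs) = unescB ('\\' :: ([] ++ xs)) by simp]
        rw [← ih.2 [] (by simp)]
      · rw [mySplit_cons_ne hx]
        rw [ih.1 (q ++ [x]), unescB_cons_ne hx]
        simp
    · intro q hq
      by_cases hx : x = '\\'
      · subst hx
        rw [mySplit_cons_self]
        cases q with
        | nil =>
          cases hps : mySplit '\\' [] xs with
          | nil => exact absurd hps (mySplit_ne_nil _ _ _)
          | cons p rest =>
            have h1 := ih.1 []
            rw [hps] at h1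
            simp only at h1
            simp only [rejoinB, List.nil_append]
            rw [h1]
            rw [unescB_esc bs_mem_escChars]
            simp
        | cons qc qs =>
          have hqc : qc ≠ '\\' := fun he => hq (he ▸ List.mem_cons_self ..)
          have hqs : '\\' ∉ qs := fun hm => hq (List.mem_cons_of_mem _ hm)
          have h2 := ih.2 [] (by simp)
          simp only [List.nil_append] at h2
          simp only [rejoinB]
          cases hps : mySplit '\\' [] xs with
          | nil => exact absurd hps (mySplit_ne_nil _ _ _)
          | cons p rest =>
            rw [hps] at h2
            by_cases he : qc ∈ ['"', '$', '`']
            · rw [if_pos he]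
              rw [show ('\\' :: ((qc :: qs) ++ '\\' :: xs)) = '\\' :: qc :: (qs ++ '\\' :: xs) by simp]
              rw [unescB_esc ((esc3_iff hqc).1 he)]
              rw [unescB_append hqs ('\\' :: xs), ← h2]
              simp
            · rw [if_neg he]
              rw [show ('\\' :: ((qc :: qs) ++ '\\' :: xs)) = '\\' :: qc :: (qs ++ '\\' :: xs) by simp]
              rw [unescB_noesc (fun hm => he ((esc3_iff hqc).2 hm))]
              rw [unescB_cons_ne hqc]
              rw [unescB_append hqs ('\\' :: xs), ← h2]
              simp
      · rw [mySplit_cons_ne hx]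
        have hq' : '\\' ∉ q ++ [x] := by
          simp [hq]
          exact fun he => hx he.symm
        rw [ih.2 (q ++ [x]) hq']
        simp

theorem ports_eq (s : String) : shell_unquote s = shell_unquote_alt s := by
  unfold shell_unquote shell_unquote_alt
  split_ifs with h1 h2 h3
  · rfl
  · rfl
  · rfl
  · rw [splitOn_single]
    set inner := PySem.List.slice s.toList (some 1) (some (-1)) with hin
    rw [loopA_eq, List.drop_zero, List.nil_append]
    have h := (rejoin_mySplit inner).1 []
    cases hps : mySplit '\\' [] inner with
    | nil => exact absurd hps (mySplit_ne_nil _ _ _)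
    | cons p rest =>
      rw [hps] at h
      simp only [List.nil_append] at h
      show String.ofList (unescB inner) = String.ofList (p ++ rejoinB rest)
      rw [h]

-- ===== VERDICT (by name: the statement is the Claim_ definition above) =====
theorem shell_unquote_spec : Claim_equal_shell_unquote := by
  intro s _
  exact ports_eq s
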